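-- pv_equiv track=rewrite | github.com/jayita13/Leetcode | Algorithms/Easy/2042. Check if Numbers Are Ascending in a Sentence.py | areNumbersAscending
-- ===== SOURCE A (Python) =====
-- def areNumbersAscending(s: str) -> bool:
--     nums = []
--
--     for i in s.split(" "):
--         if i.isnumeric():
--             nums.append(int(i))
--
--     for i in range(len(nums)-1):
--         if nums[i]>nums[i+1] or nums[i]==nums[i+1]:
--             return False
--         else:
--             continue
--
--     return True
-- ===== SOURCE B (Python) =====
-- def areNumbersAscending(s: str) -> bool:
--     prev = None
--     for tok in s.split(" "):
--         if tok.isnumeric():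
--             v = int(tok)
--             if prev is not None and v <= prev:
--                 return False
--             prev = v
--     return True
-- ===== Notes on version B (the rewrite author's own statement) =====
-- stated objective: simpler
-- what changed: Fuses A's two passes (build a nums list, then index-scan it pairwise) into one pass over the tokens that keeps only the previous number in a single variable and returns False as soon as a number fails to increase.
import Mathlib
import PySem

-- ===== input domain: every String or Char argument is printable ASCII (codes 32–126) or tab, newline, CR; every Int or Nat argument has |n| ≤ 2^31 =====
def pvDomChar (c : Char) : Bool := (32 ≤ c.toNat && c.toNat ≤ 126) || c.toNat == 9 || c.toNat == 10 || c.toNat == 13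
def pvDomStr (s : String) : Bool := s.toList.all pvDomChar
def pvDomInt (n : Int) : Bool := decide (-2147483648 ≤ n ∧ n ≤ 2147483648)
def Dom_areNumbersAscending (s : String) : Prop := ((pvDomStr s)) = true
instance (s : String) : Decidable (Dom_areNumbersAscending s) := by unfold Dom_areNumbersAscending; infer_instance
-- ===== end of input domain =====

-- B fuses A's two passes (build a nums list, then index-scan it pairwise) into one pass
-- over the tokens that keeps only the previous number; same result, simpler structure.


-- ===== PORT A =====
-- 'i.isnumeric()' ported as PySem.Str.strIsdigit: on the printable-ASCII domain the two
-- predicates coincide (ASCII numeric chars are exactly the digits 0-9).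
-- 'int(i)' via PySem.Int.ofStr?; '.getD 0' is unreachable since the token is all digits.
-- second loop: early-return index scan over range(len(nums)-1), as a recursion over that range list
def pvChkA (nums : List Int) : List Int → Bool
  | [] => true
  | i :: rest =>
    if ((PySem.List.pyGet? nums i).getD 0 > (PySem.List.pyGet? nums (i + 1)).getD 0)
        || ((PySem.List.pyGet? nums i).getD 0 == (PySem.List.pyGet? nums (i + 1)).getD 0) then
      false
    else
      pvChkA nums rest

def areNumbersAscending (s : String) : Bool :=
  let nums : List Int :=
    ((PySem.Str.split? s " ").getD []).foldl
      (fun acc i =>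
        if PySem.Str.strIsdigit i then acc ++ [(PySem.Int.ofStr? i).getD 0] else acc) []
  pvChkA nums (PySem.List.pyRange 0 ((nums.length : Int) - 1) 1)

-- ===== PORT B =====
-- one pass over the tokens, carrying only the previous number (None at the start)
def pvGoB (prev : Option Int) : List String → Bool
  | [] => true
  | t :: ts =>
    if PySem.Str.strIsdigit t then
      let v := (PySem.Int.ofStr? t).getD 0
      match prev with
      | some p => if v ≤ p then false else pvGoB (some v) ts
      | none => pvGoB (some v) ts
    else pvGoB prev ts

def areNumbersAscending_alt (s : String) : Bool :=
  pvGoB none ((PySem.Str.split? s " ").getD [])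

-- ===== PRECONDITION & SPEC =====
def Spec_areNumbersAscending (s : String) (out : Bool) : Prop := out = areNumbersAscending_alt s
instance (s : String) (out : Bool) : Decidable (Spec_areNumbersAscending s out) := by unfold Spec_areNumbersAscending; infer_instance

-- ===== CLAIM (what is proved, stated in full; the proofs are below) =====
def Claim_equal_areNumbersAscending : Prop := ∀ (s : String), Dom_areNumbersAscending s → Spec_areNumbersAscending s (areNumbersAscending s)

-- ===== LEMMAS AND PROOFS =====

-- strict-ascent check on an explicit list of numbers: the common reference point
def pvChain : List Int → Bool
  | a :: b :: rest => (a < b) && pvChain (b :: rest)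
  | _ => true

def pvNumsOf (ts : List String) : List Int :=
  ts.filterMap (fun t =>
    if PySem.Str.strIsdigit t then some ((PySem.Int.ofStr? t).getD 0) else none)

theorem pvChain_short (nums : List Int) (h : nums.length ≤ 1) : pvChain nums = true := by
  match nums, h with
  | [], _ => rfl
  | [a], _ => rfl

theorem pvChkA_eq_chain (nums : List Int) (k : Nat) :
    pvChkA nums (PySem.List.pyRange (k : Int) ((nums.length : Int) - 1) 1) =
      pvChain (nums.drop k) := by
  by_cases hk : (k : Int) < (nums.length : Int) - 1
  · have hk1 : k + 1 < nums.length := by omega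
    have hk0 : k < nums.length := by omega
    rw [PySem.List.pyRange_one_cons hk]
    have h1 : PySem.List.pyGet? nums (k : Int) = some nums[k] := by
      rw [PySem.List.pyGet?_natCast, List.getElem?_eq_getElem hk0]
    have h2 : PySem.List.pyGet? nums ((k : Int) + 1) = some nums[k + 1] := by
      have hc : ((k : Int) + 1) = ((k + 1 : Nat) : Int) := by push_cast; ring
      rw [hc, PySem.List.pyGet?_natCast, List.getElem?_eq_getElem hk1]
    have hdrop : nums.drop k = nums[k] :: nums.drop (k + 1) :=
      List.drop_eq_getElem_cons hk0
    have hdrop1 : nums.drop (k + 1) = nums[k + 1] :: nums.drop (k + 2) :=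
      List.drop_eq_getElem_cons hk1
    have ih := pvChkA_eq_chain nums (k + 1)
    rw [pvChkA, h1, h2]
    have hcast : ((k : Int) + 1) = (((k + 1 : Nat)) : Int) := by push_cast; ring
    rw [hcast] at *
    simp only [Option.getD_some]
    split_ifs with hif
    · have hnlt : ¬ nums[k] < nums[k + 1] := by
        simp only [Bool.or_eq_true, decide_eq_true_eq, beq_iff_eq] at hif
        omega
      rw [hdrop, hdrop1, pvChain, ← hdrop1, decide_eq_false hnlt, Bool.false_and]
    · have hlt : nums[k] < nums[k + 1] := by
        simp only [Bool.or_eq_true, decide_eq_true_eq, beq_iff_eq, not_or] at hif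
        omega
      rw [ih, hdrop, hdrop1, pvChain, ← hdrop1, decide_eq_true hlt, Bool.true_and]
  · rw [PySem.List.pyRange_one_eq_nil (by omega)]
    have : (nums.drop k).length ≤ 1 := by
      simp only [List.length_drop]; omega
    rw [pvChkA, pvChain_short _ this]
termination_by nums.length - k

theorem pvGoB_eq_chain (ts : List String) :
    ∀ prev : Option Int,
      pvGoB prev ts = pvChain ((prev.toList) ++ pvNumsOf ts) := by
  induction ts with
  | nil =>
    intro prev
    cases prev <;> simp [pvGoB, pvNumsOf, pvChain]
  | cons t ts ih =>
    intro prev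
    by_cases hd : PySem.Str.strIsdigit t = true
    · have hnum : pvNumsOf (t :: ts) =
          ((PySem.Int.ofStr? t).getD 0) :: pvNumsOf ts := by
        unfold pvNumsOf
        rw [List.filterMap_cons, if_pos hd]
      cases prev with
      | none =>
        show (if PySem.Str.strIsdigit t = true then
            let v := (PySem.Int.ofStr? t).getD 0
            pvGoB (some v) ts
          else pvGoB none ts) = _
        rw [if_pos hd, hnum, ih (some ((PySem.Int.ofStr? t).getD 0))]
        rfl
      | some p =>
        show (if PySem.Str.strIsdigit t = true then
            let v := (PySem.Int.ofStr? t).getD 0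
            if v ≤ p then false else pvGoB (some v) ts
          else pvGoB (some p) ts) = _
        rw [if_pos hd, hnum]
        simp only [Option.toList_some, List.cons_append, List.nil_append, pvChain]
        by_cases hle : (PySem.Int.ofStr? t).getD 0 ≤ p
        · rw [if_pos hle, decide_eq_false (by omega), Bool.false_and]
        · rw [if_neg hle, decide_eq_true (by omega), Bool.true_and,
            ih (some ((PySem.Int.ofStr? t).getD 0))]
          rfl
    · have hnum : pvNumsOf (t :: ts) = pvNumsOf ts := by
        unfold pvNumsOf
        rw [List.filterMap_cons, if_neg hd]
      cases prev with
      | none =>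
        show (if PySem.Str.strIsdigit t = true then
            let v := (PySem.Int.ofStr? t).getD 0
            pvGoB (some v) ts
          else pvGoB none ts) = _
        rw [if_neg hd, hnum, ih none]
      | some p =>
        show (if PySem.Str.strIsdigit t = true then
            let v := (PySem.Int.ofStr? t).getD 0
            if v ≤ p then false else pvGoB (some v) ts
          else pvGoB (some p) ts) = _
        rw [if_neg hd, hnum, ih (some p)]

theorem pvNumsOf_eq (ts : List String) :
    pvNumsOf ts =
      (ts.filter (fun i => PySem.Str.strIsdigit i)).map
        (fun i => (PySem.Int.ofStr? i).getD 0) := by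
  induction ts with
  | nil => rfl
  | cons t ts ih =>
    by_cases hd : PySem.Str.strIsdigit t = true
    · unfold pvNumsOf
      rw [List.filterMap_cons, if_pos hd, List.filter_cons, if_pos hd, List.map_cons]
      exact congrArg _ ih
    · unfold pvNumsOf
      rw [List.filterMap_cons, if_neg hd, List.filter_cons, if_neg hd]
      exact ih

-- ===== VERDICT (by name: the statement is the Claim_ definition above) =====
theorem areNumbersAscending_spec : Claim_equal_areNumbersAscending := by
  intro s _
  unfold Spec_areNumbersAscending areNumbersAscending areNumbersAscending_alt
  rw [PySem.List.foldl_append_if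
      (p := fun i => PySem.Str.strIsdigit i)
      (f := fun i => (PySem.Int.ofStr? i).getD 0)]
  have hA := pvChkA_eq_chain
    ((((PySem.Str.split? s " ").getD []).filter (fun i => PySem.Str.strIsdigit i)).map
      (fun i => (PySem.Int.ofStr? i).getD 0)) 0
  simp only [Nat.cast_zero, List.drop_zero] at hA
  have hB := pvGoB_eq_chain ((PySem.Str.split? s " ").getD []) none
  simp only [Option.toList_none, List.nil_append] at hB
  exact hA.trans (by rw [← pvNumsOf_eq, ← hB])
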